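-- pv_equiv track=rewrite | github.com/yahyaaly151989/Problem_Solving_in_Python_7kyu | Likes_Vs_Dislikes.py | like_or_dislike
-- ===== SOURCE A (Python) =====
-- def like_or_dislike(lst):
--     state = "Nothing"
--     for button in lst:
--         if button == "Like":
--             if state == "Dislike":
--                 state = "Like"
--             elif state == "Like":
--                 state = "Nothing"
--             else:
--                 state = "Like"
--         elif button == "Dislike":
--             if state == "Like":
--                 state = "Dislike"
--             elif state == "Dislike":
--                 state = "Nothing"
--             else:
--                 state = "Dislike"
--     return state
-- ===== SOURCE B (Python) =====
-- def like_or_dislike(lst):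
--     btns = [b for b in lst if b in ("Like", "Dislike")]
--     if not btns:
--         return "Nothing"
--     last = btns[-1]
--     run = 0
--     for b in reversed(btns):
--         if b != last:
--             break
--         run += 1
--     return last if run % 2 == 1 else "Nothing"
-- ===== Notes on version B (the rewrite author's own statement) =====
-- stated objective: alternative
-- what changed: Replaces the forward three-state simulation with a suffix computation: filter to real buttons, then the answer is the last button iff its maximal trailing run has odd length, else 'Nothing'.
import Mathlib
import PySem

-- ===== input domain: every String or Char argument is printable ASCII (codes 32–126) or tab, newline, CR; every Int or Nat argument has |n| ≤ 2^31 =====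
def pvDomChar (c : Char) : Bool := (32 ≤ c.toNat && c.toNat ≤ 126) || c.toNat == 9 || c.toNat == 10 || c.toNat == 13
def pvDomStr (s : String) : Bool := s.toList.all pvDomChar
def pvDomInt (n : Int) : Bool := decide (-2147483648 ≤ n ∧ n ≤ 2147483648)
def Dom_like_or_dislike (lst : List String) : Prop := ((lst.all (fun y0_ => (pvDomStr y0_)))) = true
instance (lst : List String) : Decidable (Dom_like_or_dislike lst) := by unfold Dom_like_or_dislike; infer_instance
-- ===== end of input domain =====

-- B replaces A's forward three-state simulation by a suffix parity computation
-- (filter to real buttons; answer = last button iff its trailing run is odd): alternative decomposition.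


-- ===== PORT A =====
-- one iteration of A's for-loop: branch structure exactly as in the Python
def aStep (state button : String) : String :=
  if button == "Like" then
    if state == "Dislike" then "Like"
    else if state == "Like" then "Nothing"
    else "Like"
  else if button == "Dislike" then
    if state == "Like" then "Dislike"
    else if state == "Dislike" then "Nothing"
    else "Dislike"
  else state

def like_or_dislike (lst : List String) : String :=
  lst.foldl aStep "Nothing"

-- ===== PORT B =====
-- B's backward run counter: 'for b in reversed(btns): if b != last: break; run += 1'
def bRun (last : String) : List String → Nat
  | [] => 0
  | b :: rest => if b != last then 0 else bRun last rest + 1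

def like_or_dislike_alt (lst : List String) : String :=
  let btns := lst.filter (fun b => b == "Like" || b == "Dislike")
  match btns.getLast? with
  | none => "Nothing"
  | some last =>
    let run := bRun last btns.reverse
    if run % 2 == 1 then last else "Nothing"

-- ===== PRECONDITION & SPEC =====
def Spec_like_or_dislike (lst : List String) (out : String) : Prop := out = like_or_dislike_alt lst
instance (lst : List String) (out : String) : Decidable (Spec_like_or_dislike lst out) := by unfold Spec_like_or_dislike; infer_instance

-- ===== CLAIM (what is proved, stated in full; the proofs are below) =====
def Claim_equal_like_or_dislike : Prop := ∀ (lst : List String), Dom_like_or_dislike lst → Spec_like_or_dislike lst (like_or_dislike lst)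

-- ===== LEMMAS AND PROOFS =====

def isBtn (b : String) : Bool := b == "Like" || b == "Dislike"

-- A's step ignores non-buttons, so folding over lst equals folding over the filtered list
theorem foldl_filter_aStep (lst : List String) (s : String) :
    lst.foldl aStep s = (lst.filter (fun b => b == "Like" || b == "Dislike")).foldl aStep s := by
  induction lst generalizing s with
  | nil => rfl
  | cons b rest ih =>
    by_cases hb : (b == "Like" || b == "Dislike") = true
    · simp [hb, List.foldl, ih]
    · have hstep : aStep s b = s := by
        simp only [Bool.or_eq_true, beq_iff_eq, not_or] at hb
        simp [aStep, hb.1, hb.2]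
      simp [hb, List.foldl, hstep, ih]

-- pressing button x toggles between x and "Nothing": parity step
theorem step_toggle (x : String) (hx : isBtn x = true) (k : Nat) :
    aStep (if k % 2 == 1 then x else "Nothing") x =
      (if (k + 1) % 2 == 1 then x else "Nothing") := by
  rcases (by simpa [isBtn] using hx : x = "Like" ∨ x = "Dislike") with h | h <;>
    subst h <;>
    rcases Nat.mod_two_eq_zero_or_one k with hm | hm <;>
    simp [aStep, hm, Nat.add_mod]

-- pressing button x after a different button y (state y or "Nothing") gives x
theorem step_switch (x y : String) (hx : isBtn x = true) (hy : isBtn y = true)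
    (hxy : y ≠ x) (k : Nat) :
    aStep (if k % 2 == 1 then y else "Nothing") x = x := by
  rcases (by simpa [isBtn] using hx : x = "Like" ∨ x = "Dislike") with h | h <;>
    rcases (by simpa [isBtn] using hy : y = "Like" ∨ y = "Dislike") with h' | h' <;>
    subst h <;> subst h' <;> first
  | exact absurd rfl hxy
  | (rcases Nat.mod_two_eq_zero_or_one k with hm | hm <;> simp [aStep, hm])

-- core: over a nonempty button-only list in reverse order (last :: rest),
-- the fold equals the trailing-run parity formula
theorem foldr_run (rest : List String) :
    ∀ (last : String), isBtn last = true → (∀ b ∈ rest, isBtn b = true) →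
      (last :: rest).foldr (fun b s => aStep s b) "Nothing" =
        (if bRun last (last :: rest) % 2 == 1 then last else "Nothing") := by
  induction rest with
  | nil =>
    intro last hlast _
    rcases (by simpa [isBtn] using hlast : last = "Like" ∨ last = "Dislike") with h | h <;>
      simp [h, List.foldr, aStep, bRun]
  | cons c rest' ih =>
    intro last hlast hall
    have hc : isBtn c = true := hall c (by simp)
    have ihr := ih c hc (fun x hx => hall x (by simp [hx]))
    have hstep : (last :: c :: rest').foldr (fun b s => aStep s b) "Nothing" =
        aStep ((c :: rest').foldr (fun b s => aStep s b) "Nothing") last := rfl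
    rw [hstep, ihr]
    by_cases hcb : c = last
    · subst hcb
      have hrun : bRun c (c :: c :: rest') = bRun c (c :: rest') + 1 := by
        simp [bRun]
      rw [hrun]
      exact step_toggle c hc _
    · have hrun : bRun last (last :: c :: rest') = 1 := by
        simp [bRun, bne, hcb]
      rw [hrun]
      simpa using step_switch last c hlast hc hcb _

-- ===== VERDICT (by name: the statement is the Claim_ definition above) =====
theorem like_or_dislike_spec : Claim_equal_like_or_dislike := by
  intro lst _
  unfold Spec_like_or_dislike like_or_dislike like_or_dislike_alt
  rw [foldl_filter_aStep]
  have hall : ∀ b ∈ (lst.filter (fun b => b == "Like" || b == "Dislike")).reverse,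
      isBtn b = true := by
    intro b hb
    rw [List.mem_reverse] at hb
    simpa [isBtn] using List.of_mem_filter hb
  have hfold : (lst.filter (fun b => b == "Like" || b == "Dislike")).foldl aStep "Nothing" =
      (lst.filter (fun b => b == "Like" || b == "Dislike")).reverse.foldr
        (fun b s => aStep s b) "Nothing" := by
    rw [List.foldr_reverse]
  rw [hfold]
  cases h : (lst.filter (fun b => b == "Like" || b == "Dislike")).reverse with
  | nil =>
    have hnil : lst.filter (fun b => b == "Like" || b == "Dislike") = [] := by
      simpa using congrArg List.reverse h
    simp [hnil, List.foldr]
  | cons last rest =>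
    have hlast : (lst.filter (fun b => b == "Like" || b == "Dislike")).getLast? = some last := by
      rw [List.getLast?_eq_head?_reverse, h]; rfl
    have hb : isBtn last = true := hall last (by simp [h])
    have hr : ∀ b ∈ rest, isBtn b = true := fun b hbm => hall b (by simp [h, hbm])
    rw [foldr_run rest last hb hr]
    simp [hlast, h]
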